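-- pv_equiv track=rewrite | github.com/stablemaverick/tape-film-ichoose | app/observability/catalog_metrics.py | resolve_exit_code_from_alerts
-- ===== SOURCE A (Python) =====
-- from typing import Any, Dict, List, Optional, Tuple
--
-- EXIT_OK = 0
--
-- EXIT_WARNING = 1
--
-- EXIT_CRITICAL = 2
--
-- def resolve_exit_code_from_alerts(alerts: List[Dict[str, str]]) -> int:
--     worst = EXIT_OK
--     for a in alerts:
--         if a["level"] == "CRITICAL":
--             worst = EXIT_CRITICAL
--         elif a["level"] == "WARNING" and worst < EXIT_CRITICAL:
--             worst = EXIT_WARNING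
--     return worst
-- ===== SOURCE B (Python) =====
-- EXIT_OK = 0
-- EXIT_WARNING = 1
-- EXIT_CRITICAL = 2
--
-- def resolve_exit_code_from_alerts(alerts):
--     levels = [a["level"] for a in alerts]
--     if "CRITICAL" in levels:
--         return EXIT_CRITICAL
--     if "WARNING" in levels:
--         return EXIT_WARNING
--     return EXIT_OK
-- ===== Notes on version B (the rewrite author's own statement) =====
-- stated objective: simpler
-- what changed: Replaces A's stateful single-pass loop with guarded accumulator updates by a staged membership test: collect the level strings once, then return CRITICAL if any is 'CRITICAL', else WARNING if any is 'WARNING', else OK — no running 'worst' state at all.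
import Mathlib
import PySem

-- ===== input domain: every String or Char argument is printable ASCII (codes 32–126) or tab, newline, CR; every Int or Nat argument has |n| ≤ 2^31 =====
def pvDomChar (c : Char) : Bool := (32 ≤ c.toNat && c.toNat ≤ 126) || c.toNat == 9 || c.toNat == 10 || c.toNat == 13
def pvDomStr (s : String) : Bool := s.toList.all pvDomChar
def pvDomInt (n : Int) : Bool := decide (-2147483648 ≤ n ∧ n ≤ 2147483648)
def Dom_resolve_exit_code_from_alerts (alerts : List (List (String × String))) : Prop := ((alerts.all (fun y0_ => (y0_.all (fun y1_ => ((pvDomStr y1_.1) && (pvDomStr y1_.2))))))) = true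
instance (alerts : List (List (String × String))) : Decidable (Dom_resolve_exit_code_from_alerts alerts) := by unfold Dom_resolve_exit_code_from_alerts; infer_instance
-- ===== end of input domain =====

-- B replaces A's stateful accumulator loop by a staged membership test over the collected level strings (simpler); return-value equivalence proved on all alert lists whose dicts carry a "level" key (Python A raises KeyError otherwise).

-- a["level"] on the dict-as-association-list: first matching key (none = KeyError)
def pyLevel? (a : List (String × String)) : Option String :=
  (a.find? (fun p => p.1 == "level")).map (·.2)

-- ===== PORT A =====
def resolve_exit_code_from_alerts (alerts : List (List (String × String))) : Int :=
  alerts.foldl (fun worst a =>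
    match pyLevel? a with
    | some lv =>
        if lv = "CRITICAL" then 2
        else if lv = "WARNING" ∧ worst < 2 then 1
        else worst
    | none => worst) 0

-- ===== PORT B =====
def resolve_exit_code_from_alerts_alt (alerts : List (List (String × String))) : Int :=
  let levels := alerts.map pyLevel?
  if (some "CRITICAL") ∈ levels then 2
  else if (some "WARNING") ∈ levels then 1
  else 0

-- ===== PRECONDITION & SPEC =====
-- Pre_ excludes exactly the alerts missing a "level" key, where Python A raises KeyError.
def Pre_resolve_exit_code_from_alerts (alerts : List (List (String × String))) : Prop :=
  ∀ a ∈ alerts, (a.any (fun p => p.1 == "level")) = true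
instance (alerts : List (List (String × String))) : Decidable (Pre_resolve_exit_code_from_alerts alerts) := by unfold Pre_resolve_exit_code_from_alerts; infer_instance

def pvWitness_resolve_exit_code_from_alerts : (List (List (String × String))) :=
  [[("level", "WARNING")], [("level", "CRITICAL")], [("level", "OK")]]

def Spec_resolve_exit_code_from_alerts (alerts : List (List (String × String))) (out : Int) : Prop := out = resolve_exit_code_from_alerts_alt alerts
instance (alerts : List (List (String × String))) (out : Int) : Decidable (Spec_resolve_exit_code_from_alerts alerts out) := by unfold Spec_resolve_exit_code_from_alerts; infer_instance

-- ===== CLAIM (what is proved, stated in full; the proofs are below) =====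
def Claim_equal_resolve_exit_code_from_alerts : Prop := ∀ (alerts : List (List (String × String))), Dom_resolve_exit_code_from_alerts alerts → Pre_resolve_exit_code_from_alerts alerts → Spec_resolve_exit_code_from_alerts alerts (resolve_exit_code_from_alerts alerts)

-- ===== LEMMAS AND PROOFS =====

-- the staged value B computes, as a function of the collected levels
def staged (levels : List (Option String)) : Int :=
  if (some "CRITICAL") ∈ levels then 2
  else if (some "WARNING") ∈ levels then 1
  else 0

theorem staged_nonneg (levels : List (Option String)) : 0 ≤ staged levels := by
  unfold staged; split_ifs <;> norm_num

theorem staged_le_two (levels : List (Option String)) : staged levels ≤ 2 := by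
  unfold staged; split_ifs <;> norm_num

-- A's loop from accumulator w computes max w (staged of the remaining levels), for 0 ≤ w ≤ 2
theorem loopA_eq_staged (alerts : List (List (String × String))) (w : Int)
    (hpre : ∀ a ∈ alerts, (a.any (fun p => p.1 == "level")) = true)
    (h0 : 0 ≤ w) (h2 : w ≤ 2) :
    alerts.foldl (fun worst a =>
      match pyLevel? a with
      | some lv =>
          if lv = "CRITICAL" then 2
          else if lv = "WARNING" ∧ worst < 2 then (1 : Int)
          else worst
      | none => worst) w = max w (staged (alerts.map pyLevel?)) := by
  induction alerts generalizing w with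
  | nil =>
      simp [staged]
      omega
  | cons a t ih =>
      have hsome : ∃ lv, pyLevel? a = some lv := by
        unfold pyLevel?
        cases hfind : a.find? (fun p => p.1 == "level") with
        | some p => exact ⟨p.2, rfl⟩
        | none =>
            exfalso
            rcases List.any_eq_true.mp (hpre a (by simp)) with ⟨q, hq, hkey⟩
            exact absurd hkey (by simpa using List.find?_eq_none.mp hfind q hq)
      rcases hsome with ⟨lv, hlv⟩
      simp only [List.foldl_cons, List.map_cons, hlv]
      have hst0 := staged_nonneg (t.map pyLevel?)
      have hst2 := staged_le_two (t.map pyLevel?)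
      by_cases hc : lv = "CRITICAL"
      · rw [if_pos hc]
        rw [ih 2 (fun x hx => hpre x (by simp [hx])) (by norm_num) le_rfl]
        unfold staged
        simp [hc]
        omega
      · by_cases hw : lv = "WARNING"
        · by_cases hlt : w < 2
          · rw [if_neg hc, if_pos ⟨hw, hlt⟩]
            rw [ih 1 (fun x hx => hpre x (by simp [hx])) (by norm_num) (by norm_num)]
            unfold staged
            simp [hw]
            split_ifs <;> omega
          · rw [if_neg hc, if_neg (by simp [hlt])]
            rw [ih w (fun x hx => hpre x (by simp [hx])) h0 h2]
            unfold staged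
            simp [hw]
            split_ifs <;> omega
        · rw [if_neg hc, if_neg (by simp [hw])]
          rw [ih w (fun x hx => hpre x (by simp [hx])) h0 h2]
          unfold staged
          simp [show ¬("CRITICAL" = lv) from fun h => hc h.symm,
                show ¬("WARNING" = lv) from fun h => hw h.symm]

-- ===== VERDICT (by name: the statement is the Claim_ definition above) =====
theorem resolve_exit_code_from_alerts_spec : Claim_equal_resolve_exit_code_from_alerts := by
  intro alerts _ hpre
  unfold Spec_resolve_exit_code_from_alerts resolve_exit_code_from_alerts resolve_exit_code_from_alerts_alt
  rw [loopA_eq_staged alerts 0 hpre le_rfl (by norm_num)]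
  rw [max_eq_right (staged_nonneg (alerts.map pyLevel?))]
  rfl
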